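-- pv_equiv track=rewrite | github.com/Trummler12/Schoolsystem2 | backend/src/main/resources/scripts/topics/restructure_disciplines_csv.py | move_subtree_after_exact
-- ===== SOURCE A (Python) =====
-- def collect_subtree(rows, prefix):
--     subtree = []
--     rest = []
--     for row in rows:
--         if row["key"] == prefix or row["key"].startswith(prefix + "."):
--             subtree.append(row)
--         else:
--             rest.append(row)
--     if subtree:
--         root = [row for row in subtree if row["key"] == prefix]
--         others = [row for row in subtree if row["key"] != prefix]
--         subtree = root + others
--     return subtree, rest
--
-- def move_subtree_after_exact(rows, subtree_prefix, after_key):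
--     subtree, rest = collect_subtree(rows, subtree_prefix)
--     if not subtree:
--         return rows
--     insert_at = next((idx for idx, row in enumerate(rest) if row["key"] == after_key), None)
--     if insert_at is None:
--         return rows
--     return rest[: insert_at + 1] + subtree + rest[insert_at + 1 :]
-- ===== SOURCE B (Python) =====
-- def move_subtree_after_exact(rows, subtree_prefix, after_key):
--     # Decorate-sort-undecorate: give every row a rank in one scan
--     # (0 = rest up to and incl. the first anchor, 1 = subtree root,
--     #  2 = subtree descendants, 3 = rest after the anchor), then one
--     # stable sort on the rank yields the final order directly.
--     dot = subtree_prefix + "."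
--     ranks = []
--     seen = False
--     has_sub = False
--     for row in rows:
--         k = row["key"]
--         if k == subtree_prefix:
--             ranks.append(1)
--             has_sub = True
--         elif k.startswith(dot):
--             ranks.append(2)
--             has_sub = True
--         elif seen:
--             ranks.append(3)
--         else:
--             ranks.append(0)
--             if k == after_key:
--                 seen = True
--     if not (has_sub and seen):
--         return rows
--     return [row for _, row in sorted(zip(ranks, rows), key=lambda p: p[0])]
-- ===== Notes on version B (the rewrite author's own statement) =====
-- stated objective: alternative
-- what changed: Replaces A's partition-into-subtree/rest + root/others comprehensions + enumerate-index-search + triple-slice splice by a decorate-sort-undecorate scheme: one scan assigns every row a rank 0-3 (rest up to the first anchor / root / descendants / rest after), then a single stable sort of (rank,row) pairs produces the final order directly.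
import Mathlib
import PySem

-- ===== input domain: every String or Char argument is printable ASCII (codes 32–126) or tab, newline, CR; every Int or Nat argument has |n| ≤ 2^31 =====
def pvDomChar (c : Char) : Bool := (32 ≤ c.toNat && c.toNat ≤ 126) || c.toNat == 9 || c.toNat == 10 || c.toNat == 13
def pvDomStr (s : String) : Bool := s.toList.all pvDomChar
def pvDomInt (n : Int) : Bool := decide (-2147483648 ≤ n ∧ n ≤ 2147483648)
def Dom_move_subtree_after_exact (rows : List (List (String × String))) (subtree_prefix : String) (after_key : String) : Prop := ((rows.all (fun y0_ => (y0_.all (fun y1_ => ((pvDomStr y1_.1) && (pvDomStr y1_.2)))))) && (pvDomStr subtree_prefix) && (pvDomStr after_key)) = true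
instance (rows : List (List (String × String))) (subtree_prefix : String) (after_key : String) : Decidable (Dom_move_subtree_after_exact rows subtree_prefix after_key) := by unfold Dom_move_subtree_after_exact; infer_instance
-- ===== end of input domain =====

-- B replaces A's partition + index-search + triple-slice splice by decorate-sort-undecorate:
-- one scan ranks every row 0-3, one stable sort on the rank gives the final order (objective: alternative).
-- Equivalence is about the RETURN value; neither version mutates its arguments.

-- row["key"]: first-match lookup in the association list (Python dicts have unique keys;
-- missing "key" raises KeyError in Python and is excluded by Pre_, so the default is never used there)
def pvKeyOf (row : List (String × String)) : String := (List.lookup "key" row).getD ""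

-- the test  row["key"] == prefix or row["key"].startswith(prefix + ".")  (dot = prefix + ".")
def pvIsSub (dot prefix_ : String) (row : List (String × String)) : Bool :=
  pvKeyOf row == prefix_ || PySem.Str.startswith (pvKeyOf row) dot

-- ===== PORT A =====
def pvCollectSubtree (rows : List (List (String × String))) (prefix_ : String) :
    List (List (String × String)) × List (List (String × String)) :=
  let p := rows.foldl
    (fun (acc : List (List (String × String)) × List (List (String × String))) row =>
      if pvIsSub (prefix_ ++ ".") prefix_ row then (acc.1 ++ [row], acc.2)
      else (acc.1, acc.2 ++ [row])) ([], [])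
  let subtree :=
    if !p.1.isEmpty then
      (p.1.filter (fun row => pvKeyOf row == prefix_)) ++
      (p.1.filter (fun row => pvKeyOf row != prefix_))
    else p.1
  (subtree, p.2)

def move_subtree_after_exact (rows : List (List (String × String))) (subtree_prefix : String) (after_key : String) : List (List (String × String)) :=
  let st := pvCollectSubtree rows subtree_prefix
  if st.1.isEmpty then rows
  else
    -- next((idx for idx, row in enumerate(rest) if row["key"] == after_key), None)
    match st.2.findIdx? (fun row => pvKeyOf row == after_key) with
    | none => rows
    -- rest[: i+1] / rest[i+1 :] with a nonnegative index are exactly take/drop (PySem.List.slice_natCast)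
    | some i => st.2.take (i + 1) ++ st.1 ++ st.2.drop (i + 1)

-- ===== PORT B =====
-- the body of B's ranking loop: state = (ranks so far, seen-anchor flag, has-subtree flag)
def pvStepB (sp ak : String) (acc : List Nat × Bool × Bool) (row : List (String × String)) :
    List Nat × Bool × Bool :=
  let k := pvKeyOf row
  if k == sp then (acc.1 ++ [1], acc.2.1, true)
  else if PySem.Str.startswith k (sp ++ ".") then (acc.1 ++ [2], acc.2.1, true)
  else if acc.2.1 then (acc.1 ++ [3], acc.2.1, acc.2.2)
  else (acc.1 ++ [0], acc.2.1 || (k == ak), acc.2.2)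

def move_subtree_after_exact_alt (rows : List (List (String × String))) (subtree_prefix : String) (after_key : String) : List (List (String × String)) :=
  let st := rows.foldl (pvStepB subtree_prefix after_key) ([], false, false)
  if !(st.2.2 && st.2.1) then rows
  else (PySem.List.sorted (List.zip st.1 rows) (fun p => p.1) false).map (fun p => p.2)

-- ===== PRECONDITION & SPEC =====
-- Pre_ excludes exactly the rows without a "key" entry, on which Python A raises KeyError.
def Pre_move_subtree_after_exact (rows : List (List (String × String))) (subtree_prefix : String) (after_key : String) : Prop :=
  ∀ row ∈ rows, (List.lookup "key" row).isSome = true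
instance (rows : List (List (String × String))) (subtree_prefix : String) (after_key : String) : Decidable (Pre_move_subtree_after_exact rows subtree_prefix after_key) := by unfold Pre_move_subtree_after_exact; infer_instance

def pvWitness_move_subtree_after_exact : (List (List (String × String))) × String × String :=
  ([[("key", "a"), ("name", "Root")], [("key", "a.b")], [("key", "x")]], "a", "x")

def Spec_move_subtree_after_exact (rows : List (List (String × String))) (subtree_prefix : String) (after_key : String) (out : List (List (String × String))) : Prop := out = move_subtree_after_exact_alt rows subtree_prefix after_key
instance (rows : List (List (String × String))) (subtree_prefix : String) (after_key : String) (out : List (List (String × String))) : Decidable (Spec_move_subtree_after_exact rows subtree_prefix after_key out) := by unfold Spec_move_subtree_after_exact; infer_instance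

-- ===== CLAIM (what is proved, stated in full; the proofs are below) =====
def Claim_equal_move_subtree_after_exact : Prop := ∀ (rows : List (List (String × String))) (subtree_prefix : String) (after_key : String), Dom_move_subtree_after_exact rows subtree_prefix after_key → Pre_move_subtree_after_exact rows subtree_prefix after_key → Spec_move_subtree_after_exact rows subtree_prefix after_key (move_subtree_after_exact rows subtree_prefix after_key)

-- ===== LEMMAS AND PROOFS =====

-- the rank B's scan assigns to a row at a point where the anchor has(n't) been seen
def pvRnk (sp : String) (seen : Bool) (r : List (String × String)) : Nat :=
  if pvKeyOf r == sp then 1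
  else if PySem.Str.startswith (pvKeyOf r) (sp ++ ".") then 2
  else if seen then 3 else 0

def pvUpd (sp ak : String) (seen : Bool) (r : List (String × String)) : Bool :=
  if pvIsSub (sp ++ ".") sp r then seen else (seen || (pvKeyOf r == ak))

-- the decorated list B's sort receives
def pvZr (sp ak : String) (seen : Bool) : List (List (String × String)) → List (Nat × List (String × String))
  | [] => []
  | r :: rs => (pvRnk sp seen r, r) :: pvZr sp ak (pvUpd sp ak seen r) rs

def pvSeenF (sp ak : String) (seen : Bool) : List (List (String × String)) → Bool
  | [] => seen
  | r :: rs => pvSeenF sp ak (pvUpd sp ak seen r) rs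

-- A's accumulation loop is the pair of filters
theorem pvFoldA {α : Type} (P : α → Bool) :
    ∀ (xs : List α) (s t : List α),
      xs.foldl (fun acc row => if P row then (acc.1 ++ [row], acc.2) else (acc.1, acc.2 ++ [row])) (s, t)
        = (s ++ xs.filter P, t ++ xs.filter (fun r => !(P r))) := by
  intro xs
  induction xs with
  | nil => intro s t; simp
  | cons x xs ih =>
    intro s t
    by_cases hx : P x = true <;> simp [List.foldl_cons, hx, ih]

theorem pvFilterPair_eq_nil {α : Type} (Q : α → Bool) (xs : List α)
    (h : xs.filter Q ++ xs.filter (fun r => !(Q r)) = []) : xs = [] := by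
  cases xs with
  | nil => rfl
  | cons x t =>
    by_cases hx : Q x = true <;> simp [List.filter, hx] at h

-- B's fold characterized
theorem pvFoldB (sp ak : String) :
    ∀ (rows : List (List (String × String))) (a : List Nat) (s h : Bool),
      rows.foldl (pvStepB sp ak) (a, s, h)
      = (a ++ (pvZr sp ak s rows).map (fun p => p.1), pvSeenF sp ak s rows,
         h || rows.any (fun r => pvIsSub (sp ++ ".") sp r)) := by
  intro rows
  induction rows with
  | nil => intro a s h; simp [pvZr, pvSeenF]
  | cons r rs ih =>
    intro a s h
    rw [List.foldl_cons]
    by_cases h1 : (pvKeyOf r == sp) = true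
    · have hsub : pvIsSub (sp ++ ".") sp r = true := by simp [pvIsSub, h1]
      have hstep : pvStepB sp ak (a, s, h) r = (a ++ [1], s, true) := by
        simp [pvStepB, h1]
      rw [hstep, ih]
      simp [pvZr, pvRnk, pvUpd, pvSeenF, hsub, h1]
    · by_cases h2 : PySem.Chars.startswith (pvKeyOf r).toList (sp.toList ++ ['.']) = true
      · have hsub : pvIsSub (sp ++ ".") sp r = true := by simp [pvIsSub, h2]
        have hstep : pvStepB sp ak (a, s, h) r = (a ++ [2], s, true) := by
          simp [pvStepB, h1, h2]
        rw [hstep, ih]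
        simp [pvZr, pvRnk, pvUpd, pvSeenF, hsub, h1, h2]
      · have hsub : pvIsSub (sp ++ ".") sp r = false := by simp [pvIsSub, h1, h2]
        cases s with
        | true =>
          have hstep : pvStepB sp ak (a, true, h) r = (a ++ [3], true, h) := by
            simp [pvStepB, h1, h2]
          rw [hstep, ih]
          simp [pvZr, pvRnk, pvUpd, pvSeenF, hsub, h1, h2]
        | false =>
          have hstep : pvStepB sp ak (a, false, h) r = (a ++ [0], pvKeyOf r == ak, h) := by
            simp [pvStepB, h1, h2]
          rw [hstep, ih]
          simp [pvZr, pvRnk, pvUpd, pvSeenF, hsub, h1, h2]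

-- re-zipping the ranks with the rows recovers the decorated list
theorem pvZipZr (sp ak : String) :
    ∀ (rows : List (List (String × String))) (s : Bool),
      List.zip ((pvZr sp ak s rows).map (fun p => p.1)) rows = pvZr sp ak s rows := by
  intro rows
  induction rows with
  | nil => intro s; simp [pvZr]
  | cons r rs ih =>
    intro s
    show List.zip ((pvZr sp ak s (r :: rs)).map (fun p => p.1)) (r :: rs) = _
    rw [show pvZr sp ak s (r :: rs) = (pvRnk sp s r, r) :: pvZr sp ak (pvUpd sp ak s r) rs from rfl]
    rw [List.map_cons, List.zip_cons_cons, ih]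

-- all ranks are ≤ 3
theorem pvZrLe (sp ak : String) :
    ∀ (rows : List (List (String × String))) (s : Bool) (p : Nat × List (String × String)),
      p ∈ pvZr sp ak s rows → p.1 ≤ 3 := by
  intro rows
  induction rows with
  | nil => intro s p hp; simp [pvZr] at hp
  | cons r rs ih =>
    intro s p hp
    simp only [pvZr, List.mem_cons] at hp
    rcases hp with hp | hp
    · subst hp; unfold pvRnk; split_ifs <;> omega
    · exact ih _ p hp

-- once the anchor is seen it stays seen
theorem pvSeenF_true (sp ak : String) :
    ∀ rows : List (List (String × String)), pvSeenF sp ak true rows = true := by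
  intro rows
  induction rows with
  | nil => rfl
  | cons r rs ih =>
    show pvSeenF sp ak (pvUpd sp ak true r) rs = true
    have : pvUpd sp ak true r = true := by unfold pvUpd; split_ifs <;> simp
    rw [this]; exact ih

-- the seen flag at the end = "some non-subtree row has the anchor key"
theorem pvSeenF_false (sp ak : String) :
    ∀ rows : List (List (String × String)),
      pvSeenF sp ak false rows
        = (rows.filter (fun r => !(pvIsSub (sp ++ ".") sp r))).any (fun r => pvKeyOf r == ak) := by
  intro rows
  induction rows with
  | nil => rfl
  | cons r rs ih =>
    show pvSeenF sp ak (pvUpd sp ak false r) rs = _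
    by_cases hs : pvIsSub (sp ++ ".") sp r = true
    · simp [pvUpd, hs, ih]
    · by_cases hq : (pvKeyOf r == ak) = true
      · simp [pvUpd, hs, hq, pvSeenF_true]
      · simp [pvUpd, hs, hq, ih]

-- findIdx? = none ↔ no hit
theorem pvFindIdxNone {α : Type} (q : α → Bool) :
    ∀ xs : List α, xs.findIdx? q = none ↔ xs.any q = false := by
  intro xs
  induction xs with
  | nil => simp
  | cons x t ih =>
    by_cases hx : q x = true <;> simp [List.findIdx?_cons, hx, ih]

-- bucket 1: the subtree roots, in order
theorem pvBucket1 (sp ak : String) :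
    ∀ (rows : List (List (String × String))) (s : Bool),
      ((pvZr sp ak s rows).filter (fun p => p.1 == 1)).map (fun p => p.2)
        = rows.filter (fun r => pvKeyOf r == sp) := by
  intro rows
  induction rows with
  | nil => intro s; simp [pvZr]
  | cons r rs ih =>
    intro s
    by_cases h1 : (pvKeyOf r == sp) = true
    · simp [pvZr, pvRnk, h1, ih]
    · by_cases h2 : PySem.Chars.startswith (pvKeyOf r).toList (sp.toList ++ ['.']) = true
      · simp [pvZr, pvRnk, h1, h2, ih]
      · by_cases hs : s = true <;> simp [pvZr, pvRnk, h1, h2, hs, ih]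

-- bucket 2: the proper descendants, in order
theorem pvBucket2 (sp ak : String) :
    ∀ (rows : List (List (String × String))) (s : Bool),
      ((pvZr sp ak s rows).filter (fun p => p.1 == 2)).map (fun p => p.2)
        = rows.filter (fun r => pvIsSub (sp ++ ".") sp r && !(pvKeyOf r == sp)) := by
  intro rows
  induction rows with
  | nil => intro s; simp [pvZr]
  | cons r rs ih =>
    intro s
    by_cases h1 : (pvKeyOf r == sp) = true
    · simp [pvZr, pvRnk, pvIsSub, h1, ih]
    · by_cases h2 : PySem.Chars.startswith (pvKeyOf r).toList (sp.toList ++ ['.']) = true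
      · simp [pvZr, pvRnk, pvIsSub, h1, h2, ih]
      · by_cases hs : s = true <;> simp [pvZr, pvRnk, pvIsSub, h1, h2, hs, ih]

-- after the anchor: bucket 0 is empty, bucket 3 is the remaining rest rows
theorem pvBucketsTrue (sp ak : String) :
    ∀ rows : List (List (String × String)),
      ((pvZr sp ak true rows).filter (fun p => p.1 == 0)) = []
      ∧ ((pvZr sp ak true rows).filter (fun p => p.1 == 3)).map (fun p => p.2)
          = rows.filter (fun r => !(pvIsSub (sp ++ ".") sp r)) := by
  intro rows
  induction rows with
  | nil => exact ⟨rfl, rfl⟩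
  | cons r rs ih =>
    have hupd : pvUpd sp ak true r = true := by unfold pvUpd; split_ifs <;> simp
    by_cases h1 : (pvKeyOf r == sp) = true
    · constructor <;> simp [pvZr, pvRnk, pvIsSub, h1, hupd, ih.1, ih.2]
    · by_cases h2 : PySem.Chars.startswith (pvKeyOf r).toList (sp.toList ++ ['.']) = true
      · constructor <;> simp [pvZr, pvRnk, pvIsSub, h1, h2, hupd, ih.1, ih.2]
      · constructor <;> simp [pvZr, pvRnk, pvIsSub, h1, h2, hupd, ih.1, ih.2]

-- before the anchor, given the anchor is at rest-index i: bucket 0 = rest[:i+1], bucket 3 = rest[i+1:]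
theorem pvBucketsFalse (sp ak : String) :
    ∀ (rows : List (List (String × String))) (i : Nat),
      (rows.filter (fun r => !(pvIsSub (sp ++ ".") sp r))).findIdx? (fun r => pvKeyOf r == ak) = some i →
      ((pvZr sp ak false rows).filter (fun p => p.1 == 0)).map (fun p => p.2)
          = (rows.filter (fun r => !(pvIsSub (sp ++ ".") sp r))).take (i + 1)
      ∧ ((pvZr sp ak false rows).filter (fun p => p.1 == 3)).map (fun p => p.2)
          = (rows.filter (fun r => !(pvIsSub (sp ++ ".") sp r))).drop (i + 1) := by
  intro rows
  induction rows with
  | nil => intro i h; simp at h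
  | cons r rs ih =>
    intro i h
    by_cases h1 : (pvKeyOf r == sp) = true
    · have hsub : pvIsSub (sp ++ ".") sp r = true := by simp [pvIsSub, h1]
      have hupd : pvUpd sp ak false r = false := by simp [pvUpd, hsub]
      rw [List.filter_cons_of_neg (by simp [hsub])] at h
      obtain ⟨ih0, ih3⟩ := ih i h
      constructor <;> simp [pvZr, pvRnk, h1, hupd, ih0, ih3, hsub]
    · by_cases h2 : PySem.Chars.startswith (pvKeyOf r).toList (sp.toList ++ ['.']) = true
      · have hsub : pvIsSub (sp ++ ".") sp r = true := by simp [pvIsSub, h2]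
        have hupd : pvUpd sp ak false r = false := by simp [pvUpd, hsub]
        rw [List.filter_cons_of_neg (by simp [hsub])] at h
        obtain ⟨ih0, ih3⟩ := ih i h
        constructor <;> simp [pvZr, pvRnk, h1, h2, hupd, ih0, ih3, hsub]
      · have hsub : pvIsSub (sp ++ ".") sp r = false := by simp [pvIsSub, h1, h2]
        rw [List.filter_cons_of_pos (by simp [hsub])] at h
        by_cases hq : (pvKeyOf r == ak) = true
        · rw [List.findIdx?_cons] at h
          simp only [hq, if_pos] at h
          have hi : i = 0 := by cases h; rfl
          subst hi
          have hupd : pvUpd sp ak false r = true := by simp [pvUpd, hsub, hq]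
          obtain ⟨t0, t3⟩ := pvBucketsTrue sp ak rs
          constructor <;> simp [pvZr, pvRnk, h1, h2, hupd, t0, t3, hsub]
        · rw [List.findIdx?_cons] at h
          simp only [hq, Bool.false_eq_true, if_neg, not_false_eq_true, Option.map_eq_some_iff] at h
          obtain ⟨j, hj, rfl⟩ := h
          have hupd : pvUpd sp ak false r = false := by simp [pvUpd, hsub, hq]
          obtain ⟨ih0, ih3⟩ := ih j hj
          constructor <;>
            simp [pvZr, pvRnk, h1, h2, hupd, ih0, ih3, hsub, List.take_succ_cons, List.drop_succ_cons]

-- inserting after a block with no later element and before a block of strictly later ones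
theorem pvInsertBy_middle {α : Type} (bef : α → α → Bool) (x : α) :
    ∀ (L R : List α), (∀ y ∈ L, bef x y = false) → (∀ y ∈ R, bef x y = true) →
      PySem.List.insertBy bef x (L ++ R) = L ++ x :: R := by
  intro L
  induction L with
  | nil =>
    intro R _ hR
    cases R with
    | nil => simp [PySem.List.insertBy]
    | cons z R' => simp [PySem.List.insertBy, hR z (by simp)]
  | cons y L ih =>
    intro R hL hR
    have hy : bef x y = false := hL y (by simp)
    simp only [List.cons_append, PySem.List.insertBy, hy, Bool.false_eq_true, if_neg,
      not_false_eq_true]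
    rw [ih R (fun z hz => hL z (by simp [hz])) hR]

-- a stable sort on a key with values in {0,1,2,3} is the concatenation of the four buckets
theorem pvSorted4Aux {α : Type} (k : α → Nat) :
    ∀ (xs b0 b1 b2 b3 : List α),
      (∀ y ∈ b0, k y = 0) → (∀ y ∈ b1, k y = 1) → (∀ y ∈ b2, k y = 2) → (∀ y ∈ b3, k y = 3) →
      (∀ x ∈ xs, k x ≤ 3) →
      xs.foldl (fun acc x => PySem.List.insertBy (fun u v => decide (k u < k v)) x acc)
          (b0 ++ b1 ++ b2 ++ b3)
        = (b0 ++ xs.filter (fun x => k x == 0)) ++ (b1 ++ xs.filter (fun x => k x == 1))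
          ++ (b2 ++ xs.filter (fun x => k x == 2)) ++ (b3 ++ xs.filter (fun x => k x == 3)) := by
  intro xs
  induction xs with
  | nil => intro b0 b1 b2 b3 _ _ _ _ _; simp
  | cons x xs ih =>
    intro b0 b1 b2 b3 h0 h1 h2 h3 hle
    have hx : k x ≤ 3 := hle x (by simp)
    have hxs : ∀ y ∈ xs, k y ≤ 3 := fun y hy => hle y (by simp [hy])
    rw [List.foldl_cons]
    interval_cases hkx : (k x)
    · rw [show b0 ++ b1 ++ b2 ++ b3 = b0 ++ (b1 ++ b2 ++ b3) from by simp]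
      rw [pvInsertBy_middle (fun u v => decide (k u < k v)) x b0 (b1 ++ b2 ++ b3)
        (by intro y hy; simp [hkx, h0 y hy])
        (by intro y hy
            simp only [List.mem_append] at hy
            rcases hy with (hy | hy) | hy
            · simp [hkx, h1 y hy]
            · simp [hkx, h2 y hy]
            · simp [hkx, h3 y hy])]
      rw [show b0 ++ x :: (b1 ++ b2 ++ b3) = (b0 ++ [x]) ++ b1 ++ b2 ++ b3 from by simp]
      rw [ih (b0 ++ [x]) b1 b2 b3
        (by intro y hy; rcases List.mem_append.mp hy with hy | hy
            · exact h0 y hy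
            · simp at hy; subst hy; exact hkx) h1 h2 h3 hxs]
      simp [hkx, List.append_assoc]
    · rw [show b0 ++ b1 ++ b2 ++ b3 = (b0 ++ b1) ++ (b2 ++ b3) from by simp]
      rw [pvInsertBy_middle (fun u v => decide (k u < k v)) x (b0 ++ b1) (b2 ++ b3)
        (by intro y hy
            rcases List.mem_append.mp hy with hy | hy
            · simp [hkx, h0 y hy]
            · simp [hkx, h1 y hy])
        (by intro y hy
            rcases List.mem_append.mp hy with hy | hy
            · simp [hkx, h2 y hy]
            · simp [hkx, h3 y hy])]
      rw [show (b0 ++ b1) ++ x :: (b2 ++ b3) = b0 ++ (b1 ++ [x]) ++ b2 ++ b3 from by simp]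
      rw [ih b0 (b1 ++ [x]) b2 b3 h0
        (by intro y hy; rcases List.mem_append.mp hy with hy | hy
            · exact h1 y hy
            · simp at hy; subst hy; exact hkx) h2 h3 hxs]
      simp [hkx, List.append_assoc]
    · rw [show b0 ++ b1 ++ b2 ++ b3 = (b0 ++ b1 ++ b2) ++ b3 from by simp]
      rw [pvInsertBy_middle (fun u v => decide (k u < k v)) x (b0 ++ b1 ++ b2) b3
        (by intro y hy
            simp only [List.mem_append] at hy
            rcases hy with (hy | hy) | hy
            · simp [hkx, h0 y hy]
            · simp [hkx, h1 y hy]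
            · simp [hkx, h2 y hy])
        (by intro y hy; simp [hkx, h3 y hy])]
      rw [show (b0 ++ b1 ++ b2) ++ x :: b3 = b0 ++ b1 ++ (b2 ++ [x]) ++ b3 from by simp]
      rw [ih b0 b1 (b2 ++ [x]) b3 h0 h1
        (by intro y hy; rcases List.mem_append.mp hy with hy | hy
            · exact h2 y hy
            · simp at hy; subst hy; exact hkx) h3 hxs]
      simp [hkx, List.append_assoc]
    · rw [show b0 ++ b1 ++ b2 ++ b3 = (b0 ++ b1 ++ b2 ++ b3) ++ [] from by simp]
      rw [pvInsertBy_middle (fun u v => decide (k u < k v)) x (b0 ++ b1 ++ b2 ++ b3) []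
        (by intro y hy
            simp only [List.mem_append] at hy
            rcases hy with ((hy | hy) | hy) | hy
            · simp [hkx, h0 y hy]
            · simp [hkx, h1 y hy]
            · simp [hkx, h2 y hy]
            · simp [hkx, h3 y hy])
        (by intro y hy; simp at hy)]
      rw [show (b0 ++ b1 ++ b2 ++ b3) ++ x :: ([] : List α) = b0 ++ b1 ++ b2 ++ (b3 ++ [x]) from by simp]
      rw [ih b0 b1 b2 (b3 ++ [x]) h0 h1 h2
        (by intro y hy; rcases List.mem_append.mp hy with hy | hy
            · exact h3 y hy
            · simp at hy; subst hy; exact hkx) hxs]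
      simp [hkx, List.append_assoc]

theorem pvSorted4 {α : Type} (k : α → Nat) (xs : List α) (h : ∀ x ∈ xs, k x ≤ 3) :
    PySem.List.sorted xs k false
      = xs.filter (fun x => k x == 0) ++ xs.filter (fun x => k x == 1)
        ++ xs.filter (fun x => k x == 2) ++ xs.filter (fun x => k x == 3) := by
  rw [PySem.List.sorted_eq_foldl_insertBy]
  simpa using pvSorted4Aux k xs [] [] [] [] (by simp) (by simp) (by simp) (by simp) h

-- ===== VERDICT (by name: the statement is the Claim_ definition above) =====
theorem move_subtree_after_exact_spec : Claim_equal_move_subtree_after_exact := by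
  intro rows sp ak _hdom _hpre
  unfold Spec_move_subtree_after_exact
  unfold move_subtree_after_exact move_subtree_after_exact_alt pvCollectSubtree
  simp only []
  rw [pvFoldA (fun row => pvIsSub (sp ++ ".") sp row) rows [] []]
  rw [pvFoldB sp ak rows [] false false]
  simp only [List.nil_append, Bool.false_or]
  rw [pvZipZr sp ak rows false]
  set P : List (String × String) → Bool := fun r => pvIsSub (sp ++ ".") sp r with hP
  set S := rows.filter P with hS
  set rest := rows.filter (fun r => !(P r)) with hrest
  by_cases hSnil : S = []
  · -- no subtree: both return rows
    have hf : rows.filter P = [] := by rw [← hS]; exact hSnil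
    have hany : rows.any P = false := by
      rw [List.any_eq_false]
      intro a ha
      have := List.filter_eq_nil_iff.mp hf a ha
      simpa using this
    simp [hSnil, hany]
  · have hany : rows.any P = true := by
      cases hax : rows.any P with
      | true => rfl
      | false =>
        exfalso; apply hSnil
        rw [hS, List.filter_eq_nil_iff]
        intro a ha
        have := (List.any_eq_false.mp hax) a ha
        simpa using this
    have hSemp : S.isEmpty = false := by simp [hSnil]
    have hCnil : (S.filter (fun row => pvKeyOf row == sp)
        ++ S.filter (fun row => pvKeyOf row != sp)) ≠ [] := by
      intro h
      exact hSnil (pvFilterPair_eq_nil (fun row => pvKeyOf row == sp) S h)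
    have hCemp : (S.filter (fun row => pvKeyOf row == sp)
        ++ S.filter (fun row => pvKeyOf row != sp)).isEmpty = false := by
      simp [hCnil]
    simp only [hSemp, Bool.not_false, if_true, hCemp, Bool.false_eq_true, if_neg,
      not_false_eq_true, Bool.true_and]
    cases hfi : rest.findIdx? (fun row => pvKeyOf row == ak) with
    | none =>
      have hseen : pvSeenF sp ak false rows = false := by
        rw [pvSeenF_false]
        rw [← hrest]
        exact (pvFindIdxNone _ rest).mp hfi
      simp [hseen]
    | some i =>
      have hseen : pvSeenF sp ak false rows = true := by
        rw [pvSeenF_false, ← hrest]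
        cases hax : rest.any (fun r => pvKeyOf r == ak) with
        | true => rfl
        | false => rw [(pvFindIdxNone _ rest).mpr hax] at hfi; cases hfi
      obtain ⟨b0, b3⟩ := pvBucketsFalse sp ak rows i (by rw [← hrest]; exact hfi)
      rw [← hrest] at b0 b3
      have hle := pvZrLe sp ak rows false
      rw [pvSorted4 (fun p => p.1) (pvZr sp ak false rows) (fun p hp => hle p hp)]
      simp only [hseen, Bool.and_true, Bool.not_true, Bool.false_eq_true, if_neg,
        not_false_eq_true, List.map_append]
      rw [b0, b3, pvBucket1 sp ak rows false, pvBucket2 sp ak rows false]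
      have hroot : rows.filter (fun r => pvKeyOf r == sp) = S.filter (fun row => pvKeyOf row == sp) := by
        rw [hS, List.filter_filter]
        congr 1
        funext r
        by_cases h : (pvKeyOf r == sp) = true
        · simp [h, hP, pvIsSub]
        · simp [h]
      have hoth : rows.filter (fun r => P r && !(pvKeyOf r == sp))
          = S.filter (fun row => pvKeyOf row != sp) := by
        rw [hS, List.filter_filter]
        congr 1
        funext r
        simp [bne, Bool.and_comm]
      rw [hroot, hoth]
      simp only [List.append_assoc]
      simp [hany]
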